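-- pv_equiv track=rewrite | github.com/ExperimentalCoroutinesApi/BigDataLabs | lab1/lab1_1_2.py | solve_task1
-- ===== SOURCE A (Python) =====
-- from collections import defaultdict
--
-- def solve_task1(data):
--     """Решает первую задачу: подсчитывает общее число участников и статистику по языкам программирования.
--
--     Args:
--         data (list[dict]): Данные из CSV-файла.
--
--     Returns:
--         tuple: Кортеж из двух элементов:
--             - total_participants (int): Общее число участников.
--             - lang_counts (dict): Словарь, где ключ — язык программирования, а значение — число участников, использующих этот язык.
--     """
--     # Множества для хранения уникальных участников и языков
--     participants = set()  # Уникальные участники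
--     lang_users = defaultdict(set)  # Участники, использующие каждый язык
--
--     for row in data:
--         user_id = row.get('User_Id', '').strip()
--         user_login = row.get('User_Login', '').strip()
--         user_inv = row.get('User_Inv', '').strip()
--         lang = row.get('Lang', '').strip()
--         score = row.get('Score', '').strip()
--
--         # Пропускаем скрытых пользователей
--         if user_inv == 'I':
--             continue
--
--         # Пропускаем строки с нулевым баллом или Compilation Error
--         if score == '-1' or score == '0':
--             continue
--
--         # Учитываем участника
--         # Уникальный идентификатор участника
--         user_key = f"{user_id}_{user_login}"
--         participants.add(user_key)
--
--         # Учитываем язык программирования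
--         lang_users[lang].add(user_key)
--
--     # Общее число участников
--     total_participants = len(participants)
--
--     # Подсчет числа участников для каждого языка
--     lang_counts = {lang: len(users) for lang, users in lang_users.items()}
--
--     return total_participants, lang_counts
-- ===== SOURCE B (Python) =====
-- def solve_task1(data):
--     # Collect the qualifying (lang, user_key) records.
--     kept = []
--     for row in data:
--         if row.get('User_Inv', '').strip() == 'I':
--             continue
--         score = row.get('Score', '').strip()
--         if score == '-1' or score == '0':
--             continue
--         kept.append((row.get('Lang', '').strip(),
--                      row.get('User_Id', '').strip() + '_' + row.get('User_Login', '').strip()))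
--
--     # Total participants: sort the user keys and count run starts.
--     uks = sorted(uk for _, uk in kept)
--     total = 0
--     prev = None
--     for u in uks:
--         if u != prev:
--             total += 1
--         prev = u
--
--     # Per-language participant counts: sort the pairs lexicographically so equal
--     # (lang, user_key) records are adjacent, then count run starts per language.
--     counts = {}
--     prevp = None
--     for p in sorted(kept):
--         if p != prevp:
--             counts[p[0]] = counts.get(p[0], 0) + 1
--         prevp = p
--
--     # Emit languages in first-appearance order, matching the dict order of the loop version.
--     order = []
--     for lg, _ in kept:
--         if lg not in order:
--             order.append(lg)
--     return total, {lg: counts[lg] for lg in order}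
-- ===== Notes on version B (the rewrite author's own statement) =====
-- stated objective: alternative
-- what changed: Replaces A's hash-based dedup (a participants set plus a defaultdict of per-language sets maintained inside the loop) with a sort-then-scan algorithm: the qualifying (lang, user_key) records are collected, the user keys and the pairs are each sorted, and distinct counts are obtained by counting run starts in the sorted lists; languages are re-emitted in first-appearance order.
import Mathlib
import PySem

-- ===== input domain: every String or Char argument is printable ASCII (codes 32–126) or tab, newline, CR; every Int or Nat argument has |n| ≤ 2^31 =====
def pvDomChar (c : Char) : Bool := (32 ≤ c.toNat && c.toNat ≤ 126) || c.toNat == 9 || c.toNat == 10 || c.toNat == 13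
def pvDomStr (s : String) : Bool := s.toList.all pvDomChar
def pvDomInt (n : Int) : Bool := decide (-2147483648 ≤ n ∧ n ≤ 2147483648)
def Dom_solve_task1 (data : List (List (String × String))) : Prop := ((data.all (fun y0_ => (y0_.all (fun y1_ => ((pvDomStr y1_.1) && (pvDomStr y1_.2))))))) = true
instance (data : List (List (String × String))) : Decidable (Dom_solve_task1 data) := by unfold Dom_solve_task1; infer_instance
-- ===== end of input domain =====

-- B replaces A's hash-based dedup (participants set + defaultdict of per-language sets)
-- by a sort-then-scan algorithm over the qualifying (lang, user_key) records; objective: alternative.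

-- ===== PORT A =====
-- one loop step of A: maintains the participants set and the per-language dict of sets
def pvStepA (st : PySem.Set String × PySem.Dict String (PySem.Set String))
    (row : List (String × String)) :
    PySem.Set String × PySem.Dict String (PySem.Set String) :=
  let user_id := PySem.Str.strip ((PySem.Dict.mk row).getD "User_Id" "")
  let user_login := PySem.Str.strip ((PySem.Dict.mk row).getD "User_Login" "")
  let user_inv := PySem.Str.strip ((PySem.Dict.mk row).getD "User_Inv" "")
  let lang := PySem.Str.strip ((PySem.Dict.mk row).getD "Lang" "")
  let score := PySem.Str.strip ((PySem.Dict.mk row).getD "Score" "")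
  if user_inv == "I" then st
  else if score == "-1" || score == "0" then st
  else
    let user_key := user_id ++ "_" ++ user_login
    (PySem.Set.add st.1 user_key,
     st.2.modify lang PySem.Set.empty (fun s => PySem.Set.add s user_key))

def solve_task1 (data : List (List (String × String))) : Int × (List (String × Int)) :=
  let st := data.foldl pvStepA (PySem.Set.empty, PySem.Dict.empty)
  ((st.1.length : Int), st.2.items.map (fun p => (p.1, (p.2.length : Int))))

-- ===== PORT B =====
-- the guard of B's collection loop
def pvKeepB (row : List (String × String)) : Bool :=
  (PySem.Str.strip ((PySem.Dict.mk row).getD "User_Inv" "") != "I") &&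
  !(PySem.Str.strip ((PySem.Dict.mk row).getD "Score" "") == "-1" ||
    PySem.Str.strip ((PySem.Dict.mk row).getD "Score" "") == "0")

-- the (lang, user_key) record B collects per qualifying row
def pvPairB (row : List (String × String)) : String × String :=
  (PySem.Str.strip ((PySem.Dict.mk row).getD "Lang" ""),
   PySem.Str.strip ((PySem.Dict.mk row).getD "User_Id" "") ++ "_" ++
     PySem.Str.strip ((PySem.Dict.mk row).getD "User_Login" ""))

def solve_task1_alt (data : List (List (String × String))) : Int × (List (String × Int)) :=
  -- kept = qualifying (lang, user_key) records, in row order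
  let kept := data.foldl (fun acc row => if pvKeepB row then acc ++ [pvPairB row] else acc) []
  -- total: sort the user keys, count run starts (prev is None before the first element)
  let uks := PySem.List.sorted (kept.map (fun p => p.2)) (fun x => x) false
  let tp := uks.foldl
    (fun (st : Int × Option String) u => (if some u ≠ st.2 then st.1 + 1 else st.1, some u))
    (0, none)
  -- per-language counts: sort the pairs lexicographically, count run starts per language
  let sp := PySem.List.sorted2 kept (fun p => p.1) (fun p => p.2) false
  let cs := sp.foldl
    (fun (st : PySem.Dict String Int × Option (String × String)) p =>
      (if some p ≠ st.2 then st.1.insert p.1 (st.1.getD p.1 0 + 1) else st.1, some p))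
    (PySem.Dict.empty, none)
  -- languages in first-appearance order
  let order := kept.foldl (fun acc p => if acc.contains p.1 then acc else acc ++ [p.1]) ([] : List String)
  -- {lg: counts[lg] for lg in order}: every lg in order is a key of counts (each qualifying
  -- record's first occurrence in the sorted pair list inserts its language), so getD is exact
  let final := order.foldl (fun d lg => d.insert lg (cs.1.getD lg 0)) PySem.Dict.empty
  (tp.1, final.items)

-- ===== PRECONDITION & SPEC =====
def Spec_solve_task1 (data : List (List (String × String))) (out : Int × (List (String × Int))) : Prop := out = solve_task1_alt data
instance (data : List (List (String × String))) (out : Int × (List (String × Int))) : Decidable (Spec_solve_task1 data out) := by unfold Spec_solve_task1; infer_instance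

-- ===== CLAIM (what is proved, stated in full; the proofs are below) =====
def Claim_equal_solve_task1 : Prop := ∀ (data : List (List (String × String))), Dom_solve_task1 data → Spec_solve_task1 data (solve_task1 data)

-- ===== LEMMAS AND PROOFS =====

-- ---- generic list helpers ----

theorem pv_len_eq {α : Type} (D1 D2 : List α) (h1 : D1.Nodup) (h2 : D2.Nodup)
    (hm : ∀ x, x ∈ D1 ↔ x ∈ D2) : D1.length = D2.length :=
  ((List.perm_ext_iff_of_nodup h1 h2).mpr hm).length_eq

-- the run-start filter of the B-side scans: first element of each run of equal values
def pvKeepFirst {α : Type} [DecidableEq α] : Option α → List α → List α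
  | _, [] => []
  | prev, p :: t => if some p ≠ prev then p :: pvKeepFirst (some p) t else pvKeepFirst (some p) t

theorem pv_kf_some {α : Type} [DecidableEq α] (R : α → α → Prop)
    (hanti : ∀ x y, R x y → R y x → x = y) :
    ∀ (s : List α) (a : α), s.Pairwise R → (∀ x ∈ s, R a x) →
      (pvKeepFirst (some a) s).Nodup ∧ (∀ x, x ∈ pvKeepFirst (some a) s ↔ x ∈ s ∧ x ≠ a) := by
  intro s
  induction s with
  | nil => intro a _ _; exact ⟨List.nodup_nil, by simp [pvKeepFirst]⟩
  | cons p t ih =>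
    intro a hpw hax
    obtain ⟨hpt, ht⟩ := List.pairwise_cons.mp hpw
    by_cases hpa : p = a
    · subst hpa
      have h := ih p ht hpt
      have e : pvKeepFirst (some p) (p :: t) = pvKeepFirst (some p) t := by
        simp [pvKeepFirst]
      rw [e]
      refine ⟨h.1, fun x => ?_⟩
      rw [h.2 x]
      constructor
      · rintro ⟨hx, hne⟩; exact ⟨List.mem_cons_of_mem _ hx, hne⟩
      · rintro ⟨hx, hne⟩
        rcases List.mem_cons.mp hx with rfl | hx
        · exact absurd rfl hne
        · exact ⟨hx, hne⟩
    · have h := ih p ht hpt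
      have e : pvKeepFirst (some a) (p :: t) = p :: pvKeepFirst (some p) t := by
        simp [pvKeepFirst, hpa]
      rw [e]
      have hpnot : p ∉ pvKeepFirst (some p) t := fun hm => ((h.2 p).mp hm).2 rfl
      refine ⟨List.nodup_cons.mpr ⟨hpnot, h.1⟩, fun x => ?_⟩
      constructor
      · intro hx
        rcases List.mem_cons.mp hx with rfl | hx
        · exact ⟨List.mem_cons_self, hpa⟩
        · obtain ⟨hxt, hxp⟩ := (h.2 x).mp hx
          refine ⟨List.mem_cons_of_mem _ hxt, ?_⟩
          rintro rfl
          exact hpa (hanti p x (hpt x hxt) (hax p (List.mem_cons_self)))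
      · rintro ⟨hx, hne⟩
        rcases List.mem_cons.mp hx with rfl | hxt
        · exact List.mem_cons_self
        · by_cases hxp : x = p
          · subst hxp; exact List.mem_cons_self
          · exact List.mem_cons_of_mem _ ((h.2 x).mpr ⟨hxt, hxp⟩)

theorem pv_kf_none {α : Type} [DecidableEq α] (R : α → α → Prop)
    (hanti : ∀ x y, R x y → R y x → x = y) (s : List α) (hs : s.Pairwise R) :
    (pvKeepFirst none s).Nodup ∧ (∀ x, x ∈ pvKeepFirst none s ↔ x ∈ s) := by
  cases s with
  | nil => exact ⟨List.nodup_nil, by simp [pvKeepFirst]⟩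
  | cons p t =>
    obtain ⟨hpt, ht⟩ := List.pairwise_cons.mp hs
    have e : pvKeepFirst none (p :: t) = p :: pvKeepFirst (some p) t := by
      simp [pvKeepFirst]
    rw [e]
    have h := pv_kf_some R hanti t p ht hpt
    have hpnot : p ∉ pvKeepFirst (some p) t := fun hm => ((h.2 p).mp hm).2 rfl
    refine ⟨List.nodup_cons.mpr ⟨hpnot, h.1⟩, fun x => ?_⟩
    constructor
    · intro hx
      rcases List.mem_cons.mp hx with rfl | hx
      · exact List.mem_cons_self
      · exact List.mem_cons_of_mem _ ((h.2 x).mp hx).1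
    · intro hx
      rcases List.mem_cons.mp hx with rfl | hxt
      · exact List.mem_cons_self
      · by_cases hxp : x = p
        · subst hxp; exact List.mem_cons_self
        · exact List.mem_cons_of_mem _ ((h.2 x).mpr ⟨hxt, hxp⟩)

-- ---- insertion-sort order facts (Pairwise for PySem's sorted/sorted2 folds) ----

theorem pv_pairwise_insertBy {α : Type} (R : α → α → Prop) (before : α → α → Bool)
    (hbt : ∀ x y, before x y = true → R x y) (hbf : ∀ x y, before x y = false → R y x)
    (htr : ∀ {x y z}, R x y → R y z → R x z) :
    ∀ (ys : List α) (x : α), ys.Pairwise R → (PySem.List.insertBy before x ys).Pairwise R := by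
  intro ys x
  induction ys with
  | nil => intro _; simp [PySem.List.insertBy]
  | cons y ys ih =>
    intro hpw
    obtain ⟨hy, hys⟩ := List.pairwise_cons.mp hpw
    by_cases hb : before x y
    · rw [show PySem.List.insertBy before x (y :: ys) = x :: y :: ys from by
        simp [PySem.List.insertBy, hb]]
      refine List.pairwise_cons.mpr ⟨?_, hpw⟩
      intro z hz
      rcases List.mem_cons.mp hz with rfl | hz
      · exact hbt x z hb
      · exact htr (hbt x y hb) (hy z hz)
    · rw [show PySem.List.insertBy before x (y :: ys) = y :: PySem.List.insertBy before x ys from by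
        simp [PySem.List.insertBy, hb]]
      refine List.pairwise_cons.mpr ⟨?_, ih hys⟩
      intro z hz
      rcases (PySem.List.mem_insertBy before x z ys).mp hz with rfl | hz
      · exact hbf _ y (by simpa using hb)
      · exact hy z hz

theorem pv_pairwise_foldl_insertBy {α : Type} (R : α → α → Prop) (before : α → α → Bool)
    (hbt : ∀ x y, before x y = true → R x y) (hbf : ∀ x y, before x y = false → R y x)
    (htr : ∀ {x y z}, R x y → R y z → R x z) :
    ∀ (xs acc : List α), acc.Pairwise R →
      (xs.foldl (fun acc x => PySem.List.insertBy before x acc) acc).Pairwise R := by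
  intro xs
  induction xs with
  | nil => intro acc h; simpa using h
  | cons x xs ih =>
    intro acc h
    rw [List.foldl_cons]
    exact ih _ (pv_pairwise_insertBy R before hbt hbf htr acc x h)

-- Python's lexicographic order on (lang, user_key) pairs
def pvLexLE (a b : String × String) : Prop := a.1 < b.1 ∨ (a.1 = b.1 ∧ a.2 ≤ b.2)

theorem pv_lex_antisymm (x y : String × String) : pvLexLE x y → pvLexLE y x → x = y := by
  rintro (h1 | ⟨e1, h1⟩) (h2 | ⟨e2, h2⟩)
  · exact absurd h1 (lt_asymm h2)
  · exact absurd h1 (not_lt.mpr (le_of_eq e2))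
  · exact absurd h2 (not_lt.mpr (le_of_eq e1))
  · exact Prod.ext e1 (le_antisymm h1 h2)

theorem pv_lex_trans {x y z : String × String} : pvLexLE x y → pvLexLE y z → pvLexLE x z := by
  rintro (h1 | ⟨e1, h1⟩) (h2 | ⟨e2, h2⟩)
  · exact Or.inl (lt_trans h1 h2)
  · exact Or.inl (lt_of_lt_of_le h1 (le_of_eq e2))
  · exact Or.inl (lt_of_le_of_lt (le_of_eq e1) h2)
  · exact Or.inr ⟨e1.trans e2, le_trans h1 h2⟩

theorem pv_sorted2_pairwise (xs : List (String × String)) :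
    (PySem.List.sorted2 xs (fun p => p.1) (fun p => p.2) false).Pairwise pvLexLE := by
  have hbt : ∀ x y : String × String,
      (decide (x.1 < y.1) || (!decide (y.1 < x.1) && decide (x.2 < y.2))) = true → pvLexLE x y := by
    intro x y hxy
    by_cases h1 : x.1 < y.1
    · exact Or.inl h1
    · rw [decide_eq_false h1, Bool.false_or] at hxy
      obtain ⟨ha, hb⟩ := (Bool.and_eq_true _ _).mp hxy
      have h2 : ¬ y.1 < x.1 := of_decide_eq_false (by simpa using ha)
      have h3 : x.2 < y.2 := of_decide_eq_true hb
      rcases lt_or_eq_of_le (not_lt.mp h2) with h | h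
      · exact absurd h h1
      · exact Or.inr ⟨h, le_of_lt h3⟩
  have hbf : ∀ x y : String × String,
      (decide (x.1 < y.1) || (!decide (y.1 < x.1) && decide (x.2 < y.2))) = false → pvLexLE y x := by
    intro x y hxy
    by_cases h2 : y.1 < x.1
    · exact Or.inl h2
    · by_cases h1 : x.1 < y.1
      · rw [decide_eq_true h1] at hxy
        exact absurd hxy (by simp)
      · by_cases h3 : x.2 < y.2
        · rw [decide_eq_false h1, decide_eq_false h2, decide_eq_true h3] at hxy
          exact absurd hxy (by simp)
        · exact Or.inr ⟨le_antisymm (not_lt.mp h1) (not_lt.mp h2), not_lt.mp h3⟩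
  exact pv_pairwise_foldl_insertBy pvLexLE _ hbt hbf (fun {x y z} => pv_lex_trans) xs []
    List.Pairwise.nil

-- ---- set-algebra facts used to read off A's per-language set sizes ----

theorem pv_update_cons {α : Type} [BEq α] (s : PySem.Set α) (a : α) (l : List α) :
    PySem.Set.update s (a :: l) = PySem.Set.update (PySem.Set.add s a) l := rfl

theorem pv_add_of_mem {α : Type} [BEq α] [LawfulBEq α] {t : List α} {b : α} (h : b ∈ t) :
    PySem.Set.add t b = t := by
  simp [PySem.Set.add, h]

theorem pv_add_of_not_mem {α : Type} [BEq α] [LawfulBEq α] {t : List α} {b : α} (h : b ∉ t) :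
    PySem.Set.add t b = t ++ [b] := by
  simp [PySem.Set.add, h]

theorem pv_ofList_append_singleton {α : Type} [BEq α] (l : List α) (a : α) :
    PySem.Set.ofList (l ++ [a]) = PySem.Set.add (PySem.Set.ofList l) a := by
  simp [PySem.Set.ofList_eq_foldl, List.foldl_append]

theorem pv_ofList_add_map {α β : Type} [BEq α] [LawfulBEq α] [BEq β] [LawfulBEq β]
    (s : List α) (a : α) (f : α → β) :
    PySem.Set.ofList ((PySem.Set.add s a).map f)
      = PySem.Set.add (PySem.Set.ofList (s.map f)) (f a) := by
  by_cases h : a ∈ s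
  · rw [pv_add_of_mem h, pv_add_of_mem]
    exact (PySem.Set.mem_ofList _ _).mpr (List.mem_map.mpr ⟨a, h, rfl⟩)
  · rw [pv_add_of_not_mem h, List.map_append, List.map_singleton, pv_ofList_append_singleton]

theorem pv_ofList_update_map {α β : Type} [BEq α] [LawfulBEq α] [BEq β] [LawfulBEq β]
    (L : List α) (s : PySem.Set α) (f : α → β) :
    PySem.Set.ofList ((PySem.Set.update s L).map f)
      = PySem.Set.update (PySem.Set.ofList (s.map f)) (L.map f) := by
  induction L generalizing s with
  | nil => simp
  | cons a L ih =>
    rw [pv_update_cons, ih, pv_ofList_add_map, List.map_cons, pv_update_cons]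

theorem pv_ofList_map_ofList {α β : Type} [BEq α] [LawfulBEq α] [BEq β] [LawfulBEq β]
    (L : List α) (f : α → β) :
    PySem.Set.ofList ((PySem.Set.ofList L).map f) = PySem.Set.ofList (L.map f) := by
  have h := pv_ofList_update_map L ([] : PySem.Set α) f
  rw [PySem.Set.update_nil_left] at h
  rw [h, List.map_nil]
  exact PySem.Set.update_nil_left _

theorem pv_filter_update {α : Type} [BEq α] [LawfulBEq α]
    (L : List α) (s : PySem.Set α) (P : α → Bool) :
    (PySem.Set.update s L).filter P = PySem.Set.update (s.filter P) (L.filter P) := by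
  induction L generalizing s with
  | nil => simp
  | cons a L ih =>
    have hstep : (PySem.Set.add s a).filter P
        = if P a then PySem.Set.add (s.filter P) a else s.filter P := by
      by_cases h : a ∈ s
      · rw [pv_add_of_mem h]
        by_cases hp : P a
        · rw [if_pos hp, pv_add_of_mem (List.mem_filter.mpr ⟨h, hp⟩)]
        · rw [if_neg hp]
      · rw [pv_add_of_not_mem h, List.filter_append]
        by_cases hp : P a
        · rw [if_pos hp]
          have hnm : a ∉ s.filter P := fun hm => h (List.mem_of_mem_filter hm)
          rw [pv_add_of_not_mem hnm]
          simp [hp]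
        · simp [hp]
    rw [pv_update_cons, ih, hstep, List.filter_cons]
    by_cases hp : P a
    · rw [if_pos hp, if_pos hp, pv_update_cons]
    · rw [if_neg hp, if_neg hp]

theorem pv_ofList_filter {α : Type} [BEq α] [LawfulBEq α] (L : List α) (P : α → Bool) :
    PySem.Set.ofList (L.filter P) = (PySem.Set.ofList L).filter P := by
  have h := pv_filter_update L ([] : PySem.Set α) P
  rw [PySem.Set.update_nil_left, List.filter_nil, PySem.Set.update_nil_left] at h
  exact h.symm

-- ---- A characterized through B's row helpers ----

theorem pv_stepA_eq (st : PySem.Set String × PySem.Dict String (PySem.Set String))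
    (row : List (String × String)) :
    pvStepA st row
      = if pvKeepB row then
          (PySem.Set.add st.1 (pvPairB row).2,
           st.2.modify (pvPairB row).1 PySem.Set.empty
             (fun s => PySem.Set.add s (pvPairB row).2))
        else st := by
  by_cases h1 : PySem.Str.strip ((PySem.Dict.mk row).getD "User_Inv" "") == "I"
  · simp [pvStepA, pvKeepB, h1, bne]
  · by_cases h2 : (PySem.Str.strip ((PySem.Dict.mk row).getD "Score" "") == "-1"
        || PySem.Str.strip ((PySem.Dict.mk row).getD "Score" "") == "0")
    · simp [pvStepA, pvKeepB, h1, h2, bne]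
    · simp [pvStepA, pvKeepB, pvPairB, h1, h2, bne]

theorem pv_foldA_fst (data : List (List (String × String)))
    (p : PySem.Set String) (d : PySem.Dict String (PySem.Set String)) :
    (data.foldl pvStepA (p, d)).1
      = PySem.Set.update p (((data.filter pvKeepB).map pvPairB).map Prod.snd) := by
  induction data generalizing p d with
  | nil => simp
  | cons row rows ih =>
    rw [List.foldl_cons, pv_stepA_eq]
    by_cases hk : pvKeepB row
    · rw [if_pos hk, List.filter_cons_of_pos hk, ih, List.map_cons, List.map_cons, pv_update_cons]
    · rw [if_neg hk, List.filter_cons_of_neg hk, ih]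

theorem pv_foldA_snd (data : List (List (String × String)))
    (p : PySem.Set String) (d : PySem.Dict String (PySem.Set String)) :
    (data.foldl pvStepA (p, d)).2
      = ((data.filter pvKeepB).map pvPairB).foldl
          (fun d pr => d.modify pr.1 PySem.Set.empty (fun s => PySem.Set.add s pr.2)) d := by
  induction data generalizing p d with
  | nil => simp
  | cons row rows ih =>
    rw [List.foldl_cons, pv_stepA_eq]
    by_cases hk : pvKeepB row
    · rw [if_pos hk, List.filter_cons_of_pos hk, ih, List.map_cons, List.foldl_cons]
    · rw [if_neg hk, List.filter_cons_of_neg hk, ih]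

theorem pv_getD_groupFold (l : List (String × String))
    (d : PySem.Dict String (PySem.Set String)) (c : String) :
    (l.foldl (fun d pr => d.modify pr.1 PySem.Set.empty (fun s => PySem.Set.add s pr.2)) d).getD c PySem.Set.empty
      = PySem.Set.update (d.getD c PySem.Set.empty)
          ((l.filter (fun pr => pr.1 == c)).map Prod.snd) := by
  induction l generalizing d with
  | nil => simp
  | cons pr l ih =>
    rw [List.foldl_cons, ih]
    by_cases hc : pr.1 = c
    · subst hc
      rw [PySem.Dict.getD_modify, if_pos rfl,
        List.filter_cons_of_pos (p := fun q : String × String => q.1 == pr.1) (by simp),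
        List.map_cons, pv_update_cons]
    · rw [PySem.Dict.getD_modify, if_neg (fun h => hc h.symm),
        List.filter_cons_of_neg (by simp [hc])]

-- A's per-language set size equals the language count in the deduplicated pair list
theorem pv_count_len (L : List (String × String)) (k : String) :
    (PySem.Set.ofList ((L.filter (fun pr => pr.1 == k)).map Prod.snd)).length
      = List.count k ((PySem.Set.ofList L).map Prod.fst) := by
  have h1 : PySem.Set.ofList ((L.filter (fun pr => pr.1 == k)).map Prod.snd)
      = ((PySem.Set.ofList L).filter (fun pr => pr.1 == k)).map Prod.snd := by
    rw [← pv_ofList_map_ofList (L.filter (fun pr => pr.1 == k)) Prod.snd, pv_ofList_filter]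
    refine PySem.Set.ofList_eq_self_of_nodup _ ?_
    refine List.Nodup.map_on ?_ ((PySem.Set.nodup_ofList L).filter _)
    intro x hx y hy hxy
    have hx2 : x.1 = k := beq_iff_eq.mp (List.mem_filter.mp hx).2
    have hy2 : y.1 = k := beq_iff_eq.mp (List.mem_filter.mp hy).2
    exact Prod.ext (hx2.trans hy2.symm) hxy
  rw [h1, List.length_map, List.count_eq_countP, List.countP_map,
    ← List.countP_eq_length_filter]
  rfl

-- ---- B's scans read off ----

theorem pv_fold_total (l : List String) (c : Int) (prev : Option String) :
    (l.foldl (fun (st : Int × Option String) u =>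
        (if some u ≠ st.2 then st.1 + 1 else st.1, some u)) (c, prev)).1
      = c + ((pvKeepFirst prev l).length : Int) := by
  induction l generalizing c prev with
  | nil => simp [pvKeepFirst]
  | cons u t ih =>
    rw [List.foldl_cons]
    by_cases h : some u ≠ prev
    · rw [if_pos h]
      rw [ih]
      simp [pvKeepFirst, h]
      omega
    · rw [if_neg h]
      rw [ih]
      simp at h
      simp [pvKeepFirst, h]

theorem pv_fold_counts (l : List (String × String))
    (d : PySem.Dict String Int) (prev : Option (String × String)) :
    (l.foldl (fun (st : PySem.Dict String Int × Option (String × String)) p =>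
        (if some p ≠ st.2 then st.1.insert p.1 (st.1.getD p.1 0 + 1) else st.1, some p)) (d, prev)).1
      = (pvKeepFirst prev l).foldl (fun d p => d.insert p.1 (d.getD p.1 0 + 1)) d := by
  induction l generalizing d prev with
  | nil => simp [pvKeepFirst]
  | cons p t ih =>
    rw [List.foldl_cons]
    by_cases h : some p ≠ prev
    · rw [if_pos h, ih]
      simp [pvKeepFirst, h]
    · rw [if_neg h, ih]
      simp at h
      simp [pvKeepFirst, h]

-- counts over mem-equivalent duplicate-free pair lists agree
theorem pv_count_map_eq {α β : Type} [DecidableEq β] (f : α → β) (D1 D2 : List α)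
    (h1 : D1.Nodup) (h2 : D2.Nodup) (hm : ∀ x, x ∈ D1 ↔ x ∈ D2) (b : β) :
    List.count b (D1.map f) = List.count b (D2.map f) :=
  (((List.perm_ext_iff_of_nodup h1 h2).mpr hm).map f).count_eq b

theorem pv_update_empty {α : Type} [BEq α] (xs : List α) :
    PySem.Set.update PySem.Set.empty xs = PySem.Set.ofList xs :=
  PySem.Set.update_nil_left xs

theorem pv_order (l : List (String × String)) :
    l.foldl (fun acc p => if acc.contains p.1 = true then acc else acc ++ [p.1]) []
      = PySem.Set.ofList (l.map (fun p => p.1)) := by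
  rw [PySem.Set.ofList_eq_foldl, List.foldl_map]
  rfl

-- ---- main equality ----

theorem solve_task1_spec_aux (data : List (List (String × String))) :
    solve_task1 data = solve_task1_alt data := by
  simp only [solve_task1, solve_task1_alt]
  rw [PySem.List.foldl_append_if pvKeepB pvPairB data [], List.nil_append]
  rw [pv_foldA_fst, pv_foldA_snd]
  set kept := List.map pvPairB (List.filter pvKeepB data) with hkept
  set uks := PySem.List.sorted (List.map (fun p => p.2) kept) (fun x => x) false with huks
  set sp := PySem.List.sorted2 kept (fun p => p.1) (fun p => p.2) false with hsp
  rw [pv_fold_total, pv_fold_counts]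
  have hcounter : (pvKeepFirst none sp).foldl
      (fun d p => d.insert p.1 (d.getD p.1 0 + 1)) PySem.Dict.empty
      = PySem.Dict.counter ((pvKeepFirst none sp).map (fun p => p.1)) := by
    rw [← PySem.Dict.foldl_insert_getD_add_one_eq_counter, List.foldl_map]
  rw [hcounter]
  rw [pv_order kept]
  have hkf1 := pv_kf_none (α := String) (· ≤ ·) (fun x y h1 h2 => le_antisymm h1 h2) uks
    (by simpa using PySem.List.sorted_pairwise (List.map (fun p => p.2) kept) (fun x => x))
  have hkf2 := pv_kf_none pvLexLE pv_lex_antisymm sp (pv_sorted2_pairwise kept)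
  have hmem2 : ∀ x, x ∈ pvKeepFirst none sp ↔ x ∈ kept := fun x =>
    (hkf2.2 x).trans (PySem.List.sorted2_perm kept (fun p => p.1) (fun p => p.2) false).mem_iff
  have e1 : (PySem.Set.update PySem.Set.empty (List.map Prod.snd kept)).length
      = (pvKeepFirst none uks).length := by
    rw [show PySem.Set.update PySem.Set.empty (List.map Prod.snd kept)
        = PySem.Set.ofList (List.map Prod.snd kept) from PySem.Set.update_nil_left _]
    refine pv_len_eq _ _ (PySem.Set.nodup_ofList _) hkf1.1 (fun x => ?_)
    exact (PySem.Set.mem_ofList _ x).trans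
      (((hkf1.2 x).trans (PySem.List.mem_sorted _ _ _ x)).symm)
  have e2 : ∀ lg : String,
      (PySem.Dict.counter ((pvKeepFirst none sp).map (fun p => p.1))).getD lg 0
        = ((List.count lg ((PySem.Set.ofList kept).map Prod.fst) : Nat) : Int) := by
    intro lg
    rw [PySem.Dict.getD_counter]
    exact_mod_cast pv_count_map_eq (fun p => p.1) _ _ hkf2.1
      (PySem.Set.nodup_ofList _)
      (fun x => (hmem2 x).trans (PySem.Set.mem_ofList kept x).symm) lg
  have hnk : (List.foldl (fun d pr => d.modify pr.1 PySem.Set.empty fun s => s.add pr.2)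
      PySem.Dict.empty kept).keys.Nodup :=
    PySem.Dict.nodup_keys_foldl_modify_key kept (fun pr => pr.1) PySem.Set.empty
      (fun _ pr s => PySem.Set.add s pr.2) PySem.Dict.empty PySem.Dict.nodup_keys_empty
  have hkeys : (List.foldl (fun d pr => d.modify pr.1 PySem.Set.empty fun s => s.add pr.2)
      PySem.Dict.empty kept).keys = PySem.Set.ofList (kept.map (fun p => p.1)) := by
    rw [PySem.Dict.keys_foldl_modify_key kept (fun pr => pr.1) PySem.Set.empty
      (fun _ pr s => PySem.Set.add s pr.2) PySem.Dict.empty, PySem.Dict.keys_empty,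
      PySem.Set.update_nil_left]
  rw [PySem.Dict.items_eq_map_keys _ hnk PySem.Set.empty, hkeys]
  rw [PySem.Dict.items_foldl_insert_fresh (PySem.Set.ofList (kept.map (fun p => p.1)))
    (fun lg => lg)
    (fun lg => (PySem.Dict.counter ((pvKeepFirst none sp).map (fun p => p.1))).getD lg 0)
    PySem.Dict.empty (fun a _ => PySem.Dict.contains_empty a)
    (by simp [PySem.Set.nodup_ofList (kept.map (fun p => p.1))])]
  refine Prod.ext ?_ ?_
  · show ((PySem.Set.update PySem.Set.empty (List.map Prod.snd kept)).length : Int)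
      = 0 + ((pvKeepFirst none uks).length : Int)
    rw [e1]
    omega
  · show List.map (fun p => (p.1, (p.2.length : Int)))
        (List.map (fun k => (k, (List.foldl
            (fun d pr => d.modify pr.1 PySem.Set.empty fun s => s.add pr.2)
            PySem.Dict.empty kept).getD k PySem.Set.empty))
          (PySem.Set.ofList (kept.map (fun p => p.1))))
      = PySem.Dict.empty.items ++ List.map (fun lg => (lg,
          (PySem.Dict.counter ((pvKeepFirst none sp).map (fun p => p.1))).getD lg 0))
          (PySem.Set.ofList (kept.map (fun p => p.1)))
    rw [List.map_map, show PySem.Dict.empty.items = ([] : List (String × Int)) from rfl,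
      List.nil_append]
    refine List.map_congr_left (fun k _ => ?_)
    simp only [Function.comp]
    rw [pv_getD_groupFold, PySem.Dict.getD_empty, pv_update_empty, e2 k]
    rw [pv_count_len]
-- ===== VERDICT (by name: the statement is the Claim_ definition above) =====
theorem solve_task1_spec : Claim_equal_solve_task1 := by
  intro data _
  unfold Spec_solve_task1
  exact solve_task1_spec_aux data
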